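-- pv_equiv track=rewrite | github.com/puffsnow/code-practice | CheckIO/PYCON TW 2014/Simple 2048.py | ConvertBackMap
-- ===== SOURCE A (Python) =====
-- def ConvertBackMap(map, command):
--   Elements = []
--   for row in map:
--     Elements = Elements + row
--   if command == "left":
--     return map
--   if command == "right":
--     return [[Elements[3], Elements[2], Elements[1], Elements[0]],
--             [Elements[7], Elements[6], Elements[5], Elements[4]],
--             [Elements[11], Elements[10], Elements[9], Elements[8]],
--             [Elements[15], Elements[14], Elements[13], Elements[12]]]
--   if command == "down":
--     return [[Elements[3], Elements[7], Elements[11], Elements[15]],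
--             [Elements[2], Elements[6], Elements[10], Elements[14]],
--             [Elements[1], Elements[5], Elements[9], Elements[13]],
--             [Elements[0], Elements[4], Elements[8], Elements[12]]]
--   if command == "up":
--     return [[Elements[12], Elements[8], Elements[4], Elements[0]],
--             [Elements[13], Elements[9], Elements[5], Elements[1]],
--             [Elements[14], Elements[10], Elements[6], Elements[2]],
--             [Elements[15], Elements[11], Elements[7], Elements[3]]]
-- ===== SOURCE B (Python) =====
-- def ConvertBackMap(map, command):
--     if command == "left":
--         return map
--     if command == "right":
--         return [row[::-1] for row in map]
--     if command == "down":
--         return [list(t) for t in zip(*map)][::-1]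
--     if command == "up":
--         return [list(t)[::-1] for t in zip(*map)]
-- ===== Notes on version B (the rewrite author's own statement) =====
-- stated objective: faster
-- what changed: B drops A's quadratic flatten (repeated list concatenation) and hard-coded index tables, operating on the 2-D grid directly: reverse each row for 'right', transpose via zip for 'down'/'up'.
import Mathlib
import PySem

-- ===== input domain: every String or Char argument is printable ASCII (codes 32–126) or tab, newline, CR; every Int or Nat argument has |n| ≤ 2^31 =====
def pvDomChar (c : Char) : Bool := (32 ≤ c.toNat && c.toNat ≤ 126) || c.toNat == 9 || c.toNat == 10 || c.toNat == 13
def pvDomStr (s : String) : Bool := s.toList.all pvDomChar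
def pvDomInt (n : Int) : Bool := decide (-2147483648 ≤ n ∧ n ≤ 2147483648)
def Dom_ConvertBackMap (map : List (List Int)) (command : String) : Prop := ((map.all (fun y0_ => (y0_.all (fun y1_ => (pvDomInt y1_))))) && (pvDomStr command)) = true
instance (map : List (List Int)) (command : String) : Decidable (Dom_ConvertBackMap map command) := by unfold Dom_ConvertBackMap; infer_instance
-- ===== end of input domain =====

-- ===== PORT A =====
-- B drops A's flatten step and hard-coded index tables, working on the 2-D grid directly (idiomatic); agreement is claimed on 4x4 grids for the three moving commands (Pre_).
-- Elements[i] ported with PySem.List.pyGet? (none = IndexError); the whole branch becomes none if any index is out of range.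
def ConvertBackMap (map : List (List Int)) (command : String) : Option (List (List Int)) :=
  let Elements := map.foldl (fun acc row => acc ++ row) []
  let g := fun (i : Int) => PySem.List.pyGet? Elements i
  if command = "left" then some map
  else if command = "right" then do
    let r0 ← [g 3, g 2, g 1, g 0].mapM id
    let r1 ← [g 7, g 6, g 5, g 4].mapM id
    let r2 ← [g 11, g 10, g 9, g 8].mapM id
    let r3 ← [g 15, g 14, g 13, g 12].mapM id
    some [r0, r1, r2, r3]
  else if command = "down" then do
    let r0 ← [g 3, g 7, g 11, g 15].mapM id
    let r1 ← [g 2, g 6, g 10, g 14].mapM id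
    let r2 ← [g 1, g 5, g 9, g 13].mapM id
    let r3 ← [g 0, g 4, g 8, g 12].mapM id
    some [r0, r1, r2, r3]
  else if command = "up" then do
    let r0 ← [g 12, g 8, g 4, g 0].mapM id
    let r1 ← [g 13, g 9, g 5, g 1].mapM id
    let r2 ← [g 14, g 10, g 6, g 2].mapM id
    let r3 ← [g 15, g 11, g 7, g 3].mapM id
    some [r0, r1, r2, r3]
  else none

-- ===== PORT B =====
-- zip(*m): rows of the transpose, stopping at the shortest row (exact Python zip semantics);
-- fuel = length of the first row bounds the number of output rows.
def pvZipStarAux : Nat → List (List Int) → List (List Int)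
  | 0, _ => []
  | n + 1, m =>
    match m.mapM List.head? with
    | none => []
    | some hs => hs :: pvZipStarAux n (m.map List.tail)

def pvZipStar (m : List (List Int)) : List (List Int) :=
  pvZipStarAux (m.headD []).length m

-- row[::-1] is List.reverse (exact)
def ConvertBackMap_alt (map : List (List Int)) (command : String) : Option (List (List Int)) :=
  if command = "left" then some map
  else if command = "right" then some (map.map List.reverse)
  else if command = "down" then some ((pvZipStar map).reverse)
  else if command = "up" then some ((pvZipStar map).map List.reverse)
  else none

-- ===== PRECONDITION & SPEC =====
-- Pre_ excludes, for the commands "right"/"down"/"up" only, grids that are not 4x4: there A's flat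
-- indexing either raises IndexError (fewer than 16 cells) or silently reads the first 16 cells of an
-- arbitrarily shaped grid, while B respects the row structure.
def Pre_ConvertBackMap (map : List (List Int)) (command : String) : Prop :=
  (command = "right" ∨ command = "down" ∨ command = "up") →
    (map.length = 4 ∧ ∀ row ∈ map, row.length = 4)
instance (map : List (List Int)) (command : String) : Decidable (Pre_ConvertBackMap map command) := by unfold Pre_ConvertBackMap; infer_instance
def pvWitness_ConvertBackMap : List (List Int) × String :=
  ([[1, 2, 3, 4], [5, 6, 7, 8], [9, 10, 11, 12], [13, 14, 15, 16]], "right")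

def Spec_ConvertBackMap (map : List (List Int)) (command : String) (out : Option (List (List Int))) : Prop := out = ConvertBackMap_alt map command
instance (map : List (List Int)) (command : String) (out : Option (List (List Int))) : Decidable (Spec_ConvertBackMap map command out) := by unfold Spec_ConvertBackMap; infer_instance

-- ===== CLAIM (what is proved, stated in full; the proofs are below) =====
def Claim_equal_ConvertBackMap : Prop := ∀ (map : List (List Int)) (command : String), Dom_ConvertBackMap map command → Pre_ConvertBackMap map command → Spec_ConvertBackMap map command (ConvertBackMap map command)

-- ===== LEMMAS AND PROOFS =====
-- On a concrete 4x4 grid (entries symbolic), both ports compute the same literal grid.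
theorem pv_move_eq (a b c d e f g h i j k l m n o p : Int) (command : String) :
    ConvertBackMap [[a,b,c,d],[e,f,g,h],[i,j,k,l],[m,n,o,p]] command
      = ConvertBackMap_alt [[a,b,c,d],[e,f,g,h],[i,j,k,l],[m,n,o,p]] command := by
  unfold ConvertBackMap ConvertBackMap_alt pvZipStar
  split_ifs <;>
    simp [PySem.List.pyGet?, PySem.List.pyIdx?, List.mapM, List.mapM.loop, pvZipStarAux]

-- ===== VERDICT (by name: the statement is the Claim_ definition above) =====
theorem ConvertBackMap_spec : Claim_equal_ConvertBackMap := by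
  intro map command _ hpre
  unfold Spec_ConvertBackMap
  by_cases hl : command = "left"
  · simp [ConvertBackMap, ConvertBackMap_alt, hl]
  by_cases hmv : command = "right" ∨ command = "down" ∨ command = "up"
  · obtain ⟨hlen, hrows⟩ := hpre hmv
    rcases map with _ | ⟨r0, _ | ⟨r1, _ | ⟨r2, _ | ⟨r3, _ | ⟨r4, tl⟩⟩⟩⟩⟩ <;> simp_all
    obtain ⟨h0, h1, h2, h3⟩ := hrows
    rcases r0 with _ | ⟨a, _ | ⟨b, _ | ⟨c, _ | ⟨d, _ | _⟩⟩⟩⟩ <;> simp_all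
    rcases r1 with _ | ⟨e, _ | ⟨f, _ | ⟨g, _ | ⟨h, _ | _⟩⟩⟩⟩ <;> simp_all
    rcases r2 with _ | ⟨i, _ | ⟨j, _ | ⟨k, _ | ⟨l, _ | _⟩⟩⟩⟩ <;> simp_all
    rcases r3 with _ | ⟨m, _ | ⟨n, _ | ⟨o, _ | ⟨p, _ | _⟩⟩⟩⟩ <;> simp_all
    exact pv_move_eq a b c d e f g h i j k l m n o p command
  · push Not at hmv
    obtain ⟨h2, h3, h4⟩ := hmv
    simp [ConvertBackMap, ConvertBackMap_alt, hl, h2, h3, h4]
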